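-- pv_equiv track=rewrite | github.com/GeorgMeore/aoc2023 | day2/part2.py | min_power_sum
-- ===== SOURCE A (Python) =====
-- def min_power_sum(games):
--     sum = 0
--     for i, game in enumerate(games, 1):
--         maxes = {"red": 0, "green": 0, "blue": 0}
--         for subset in game:
--             for no, color in subset:
--                 maxes[color] = max(maxes[color], no)
--         sum += maxes["red"] * maxes["green"] * maxes["blue"]
--     return sum
-- ===== SOURCE B (Python) =====
-- def _first(pairs, color):
--     for n, c in pairs:
--         if c == color:
--             return max(n, 0)
--     return 0
--
-- def min_power_sum(games):
--     total = 0
--     for game in games: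
--         pairs = sorted((p for subset in game for p in subset),
--                        key=lambda p: p[0], reverse=True)
--         total += (_first(pairs, "red") * _first(pairs, "green")
--                   * _first(pairs, "blue"))
--     return total
-- ===== Notes on version B (the rewrite author's own statement) =====
-- stated objective: alternative
-- what changed: Replaces A's fused dict-updating max-accumulation with sort-then-scan: each game's pairs are flattened and sorted once in descending count order, after which each color's maximum is simply the first matching pair (floored at 0), so no running maxima are maintained at all.
-- outside the precondition, e.g. on min_power_sum([[[(3, 'yellow')]]]): A raises KeyError, B returns 0
import Mathlib
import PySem

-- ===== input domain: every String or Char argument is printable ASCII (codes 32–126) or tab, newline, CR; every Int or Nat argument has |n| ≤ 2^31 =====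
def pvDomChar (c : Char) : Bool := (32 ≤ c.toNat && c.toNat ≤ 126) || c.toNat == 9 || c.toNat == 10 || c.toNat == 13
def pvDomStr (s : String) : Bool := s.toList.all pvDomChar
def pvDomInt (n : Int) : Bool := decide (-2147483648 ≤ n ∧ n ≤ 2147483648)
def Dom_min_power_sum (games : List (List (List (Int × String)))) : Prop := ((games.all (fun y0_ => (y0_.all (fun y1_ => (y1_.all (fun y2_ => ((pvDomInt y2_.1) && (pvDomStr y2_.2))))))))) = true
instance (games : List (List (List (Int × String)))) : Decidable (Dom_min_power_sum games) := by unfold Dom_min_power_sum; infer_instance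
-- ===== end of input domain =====

-- B replaces A's fused dict-updating max-accumulation with sort-then-scan: each game's pairs
-- are flattened and sorted once in descending count order, after which each color's maximum
-- is the first matching pair (floored at 0); same result, different algorithm ("alternative").

-- ===== PORT A =====
-- maxes[color] = max(maxes[color], no): under Pre_ every color is a key of maxes, so the
-- KeyError branch (none) is unreachable and getD is exact there.
def min_power_sum (games : List (List (List (Int × String)))) : Int :=
  games.foldl (fun sum game =>
    let maxes : PySem.Dict String Int :=
      game.foldl (fun d subset =>
        subset.foldl (fun d p => d.insert p.2 (max (d.getD p.2 0) p.1)) d)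
        (PySem.Dict.ofList [("red", 0), ("green", 0), ("blue", 0)])
    sum + maxes.getD "red" 0 * maxes.getD "green" 0 * maxes.getD "blue" 0) 0

-- ===== PORT B =====
-- _first(pairs, color): first matching pair of the (descending-sorted) list, floored at 0
def pvFirst (color : String) : List (Int × String) → Int
  | [] => 0
  | p :: t => if p.2 == color then max p.1 0 else pvFirst color t

def min_power_sum_alt (games : List (List (List (Int × String)))) : Int :=
  games.foldl (fun total game =>
    let pairs := PySem.List.sorted (game.flatMap (fun s => s)) (fun p => p.1) true
    total + pvFirst "red" pairs * pvFirst "green" pairs * pvFirst "blue" pairs) 0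

-- ===== PRECONDITION & SPEC =====
-- Pre_ excludes inputs containing a color other than "red"/"green"/"blue": there the Python A
-- raises KeyError (returns nothing).
def Pre_min_power_sum (games : List (List (List (Int × String)))) : Prop :=
  (games.all (fun game => game.all (fun subset => subset.all
    (fun p => p.2 == "red" || p.2 == "green" || p.2 == "blue")))) = true
instance (games : List (List (List (Int × String)))) : Decidable (Pre_min_power_sum games) := by unfold Pre_min_power_sum; infer_instance

def pvWitness_min_power_sum : (List (List (List (Int × String)))) :=
  [[[(3, "red"), (2, "blue")], [(5, "green")]], [[(-1, "red")]]]

def Spec_min_power_sum (games : List (List (List (Int × String)))) (out : Int) : Prop := out = min_power_sum_alt games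
instance (games : List (List (List (Int × String)))) (out : Int) : Decidable (Spec_min_power_sum games out) := by unfold Spec_min_power_sum; infer_instance

-- ===== CLAIM (what is proved, stated in full; the proofs are below) =====
def Claim_equal_min_power_sum : Prop := ∀ (games : List (List (List (Int × String)))), Dom_min_power_sum games → Pre_min_power_sum games → Spec_min_power_sum games (min_power_sum games)

-- ===== LEMMAS AND PROOFS =====

-- after A's update loop, the value stored at c is the running max (from d's value) of the
-- counts of color c in the pairs processed
lemma dictfold_getD (pairs : List (Int × String)) (d : PySem.Dict String Int) (c : String) :
    (pairs.foldl (fun d p => d.insert p.2 (max (d.getD p.2 0) p.1)) d).getD c 0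
      = (pairs.filter (fun p => p.2 == c)).foldl (fun a p => max a p.1) (d.getD c 0) := by
  induction pairs generalizing d with
  | nil => rfl
  | cons p t ih =>
      simp only [List.foldl_cons, List.filter_cons]
      by_cases h : p.2 = c
      · subst h
        simp [ih]
      · have hcf : (p.2 == c) = false := by simp [h]
        simp only [hcf, Bool.false_eq_true, if_false, ih]
        rw [PySem.Dict.getD_insert, if_neg (fun hc => h hc.symm)]

-- A's nested subset loop is a loop over the flattened game
lemma foldl_foldl_flatten {α β : Type} (f : β → α → β) (game : List (List α)) (d : β) :
    game.foldl (fun d subset => subset.foldl f d) d = (game.flatMap (fun s => s)).foldl f d := by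
  induction game generalizing d with
  | nil => rfl
  | cons s t ih => simp [List.foldl_cons, ih]

-- B's first-match scan reads off the head of the color's filtered sublist
lemma pvFirst_eq_filter (c : String) (l : List (Int × String)) :
    pvFirst c l = (match l.filter (fun p => p.2 == c) with
                   | [] => 0
                   | q :: _ => max q.1 0) := by
  induction l with
  | nil => rfl
  | cons p t ih =>
      by_cases h : p.2 = c
      · simp [pvFirst, h]
      · simp [pvFirst, h, ih]

lemma foldl_max_of_le (ts : List (Int × String)) (a : Int) (h : ∀ x ∈ ts, x.1 ≤ a) :
    ts.foldl (fun a p => max a p.1) a = a := by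
  induction ts with
  | nil => rfl
  | cons q t ih =>
      have hq : max a q.1 = a := max_eq_left (h q (by simp))
      simp only [List.foldl_cons, hq]
      exact ih (fun x hx => h x (by simp [hx]))

-- foldl max is invariant under permutation
lemma foldl_max_perm {l₁ l₂ : List (Int × String)} (h : l₁.Perm l₂) (a : Int) :
    l₁.foldl (fun a p => max a p.1) a = l₂.foldl (fun a p => max a p.1) a :=
  @List.Perm.foldl_eq _ _ _ _ _ ⟨fun b x y => by show max (max b x.1) y.1 = max (max b y.1) x.1; omega⟩ h a

-- the filtered foldl-max over any list equals B's first-match on its descending sort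
lemma filterMax_eq_pvFirst (L : List (Int × String)) (c : String) :
    (L.filter (fun p => p.2 == c)).foldl (fun a p => max a p.1) 0
      = pvFirst c (PySem.List.sorted L (fun p => p.1) true) := by
  set S := PySem.List.sorted L (fun p => p.1) true with hS
  have hperm : (L.filter (fun p => p.2 == c)).Perm (S.filter (fun p => p.2 == c)) :=
    (List.Perm.filter _ (PySem.List.sorted_perm L (fun p => p.1) true)).symm
  rw [foldl_max_perm hperm, pvFirst_eq_filter]
  have hpw : (S.filter (fun p => p.2 == c)).Pairwise (fun a b => b.1 ≤ a.1) :=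
    List.Pairwise.filter _ (PySem.List.sorted_pairwise_rev L (fun p => p.1))
  cases hfil : S.filter (fun p => p.2 == c) with
  | nil => rfl
  | cons q t =>
      rw [hfil] at hpw
      have hle : ∀ x ∈ t, x.1 ≤ max 0 q.1 := fun x hx =>
        le_trans ((List.pairwise_cons.mp hpw).1 x hx) (le_max_right 0 q.1)
      simp only [List.foldl_cons, foldl_max_of_le t (max 0 q.1) hle]
      exact max_comm 0 q.1

-- per-game: A's triple of dict maxima multiplies to B's triple of sorted first-matches
lemma per_game (game : List (List (Int × String))) :
    (let maxes : PySem.Dict String Int :=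
      game.foldl (fun d subset =>
        subset.foldl (fun d p => d.insert p.2 (max (d.getD p.2 0) p.1)) d)
        (PySem.Dict.ofList [("red", 0), ("green", 0), ("blue", 0)])
     maxes.getD "red" 0 * maxes.getD "green" 0 * maxes.getD "blue" 0)
      = (let pairs := PySem.List.sorted (game.flatMap (fun s => s)) (fun p => p.1) true
         pvFirst "red" pairs * pvFirst "green" pairs * pvFirst "blue" pairs) := by
  simp only
  rw [foldl_foldl_flatten]
  rw [dictfold_getD, dictfold_getD, dictfold_getD]
  rw [show (PySem.Dict.ofList [("red",(0:Int)),("green",0),("blue",0)]).getD "red" 0 = 0 from rfl,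
      show (PySem.Dict.ofList [("red",(0:Int)),("green",0),("blue",0)]).getD "green" 0 = 0 from rfl,
      show (PySem.Dict.ofList [("red",(0:Int)),("green",0),("blue",0)]).getD "blue" 0 = 0 from rfl,
      filterMax_eq_pvFirst, filterMax_eq_pvFirst, filterMax_eq_pvFirst]

-- ===== VERDICT (by name: the statement is the Claim_ definition above) =====
theorem min_power_sum_spec : Claim_equal_min_power_sum := by
  intro games _ _
  unfold Spec_min_power_sum min_power_sum min_power_sum_alt
  apply PySem.List.foldl_congr_mem
  intro acc game _
  simp only
  rw [per_game]
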